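-- pv_equiv track=rewrite | github.com/GrantMatejka/AdventOfCode | 2023/13/sol.py | get_refl_row
-- ===== SOURCE A (Python) =====
-- def get_refl_row(terrain):
-- 	x = 0
-- 	while x < len(terrain):
-- 		lower = x
-- 		upper = x + 1
-- 		mirrored = False
-- 		while lower >= 0 and upper < len(terrain):
-- 			if terrain[lower] != terrain[upper]:
-- 				mirrored = False
-- 				break
-- 			else:
-- 				mirrored = True
-- 			lower -= 1
-- 			upper += 1
--
-- 		if mirrored:
-- 			return x
-- 		x += 1
-- 	return -1
-- ===== SOURCE B (Python) =====
-- def get_refl_row(terrain):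
--     n = len(terrain)
--     for x in range(n - 1):
--         above = list(reversed(terrain[:x + 1]))
--         below = terrain[x + 1:]
--         w = min(len(above), len(below))
--         if above[:w] == below[:w]:
--             return x
--     return -1
-- ===== Notes on version B (the rewrite author's own statement) =====
-- stated objective: idiomatic
-- what changed: Replaces A's hand-rolled two-pointer expansion inside a while loop by a direct slice formulation: for each candidate boundary, compare the reversed prefix with the suffix truncated to their common width.
import Mathlib
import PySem

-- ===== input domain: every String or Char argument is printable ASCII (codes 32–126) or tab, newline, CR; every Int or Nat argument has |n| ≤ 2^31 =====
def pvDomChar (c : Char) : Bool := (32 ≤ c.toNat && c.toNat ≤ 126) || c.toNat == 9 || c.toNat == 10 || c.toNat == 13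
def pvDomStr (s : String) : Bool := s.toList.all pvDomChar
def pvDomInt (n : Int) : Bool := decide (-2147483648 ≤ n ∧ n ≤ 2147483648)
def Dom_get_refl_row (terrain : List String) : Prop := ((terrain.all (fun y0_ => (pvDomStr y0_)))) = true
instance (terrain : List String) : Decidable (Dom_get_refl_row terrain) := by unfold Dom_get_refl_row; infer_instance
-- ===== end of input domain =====

-- B replaces A's hand-rolled two-pointer expansion by a slice formulation (reversed
-- prefix vs suffix truncated to the common width); same cost, plainer code.

-- ===== PORT A =====
-- inner 'while lower >= 0 and upper < len(terrain)' loop, carrying 'mirrored'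
def pvAInner (terrain : List String) (lower upper : Int) (mirrored : Bool) : Bool :=
  if _h : 0 ≤ lower ∧ upper < (terrain.length : Int) then
    if PySem.List.pyGet? terrain lower ≠ PySem.List.pyGet? terrain upper then
      false
    else
      pvAInner terrain (lower - 1) (upper + 1) true
  else mirrored
termination_by (lower + 1).toNat
decreasing_by omega

-- outer 'while x < len(terrain)' loop
def pvAOuter (terrain : List String) (x : Int) : Int :=
  if _h : x < (terrain.length : Int) then
    if pvAInner terrain x (x + 1) false then x else pvAOuter terrain (x + 1)
  else -1
termination_by ((terrain.length : Int) - x).toNat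
decreasing_by omega

def get_refl_row (terrain : List String) : Int := pvAOuter terrain 0

-- ===== PORT B =====
-- the test in the body of Source B's 'for x in range(n - 1)' loop
def pvBCheck (terrain : List String) (x : Int) : Bool :=
  let above := (PySem.List.slice terrain none (some (x + 1))).reverse
  let below := PySem.List.slice terrain (some (x + 1)) none
  let w : Int := min (above.length : Int) (below.length : Int)
  PySem.List.slice above none (some w) == PySem.List.slice below none (some w)

-- 'for x in …: if …: return x', falling through to -1
def pvBLoop (terrain : List String) : List Int → Int
  | [] => -1
  | x :: rest => if pvBCheck terrain x then x else pvBLoop terrain rest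

def get_refl_row_alt (terrain : List String) : Int :=
  pvBLoop terrain (PySem.List.pyRange 0 ((terrain.length : Int) - 1) 1)

-- ===== PRECONDITION & SPEC =====
def Spec_get_refl_row (terrain : List String) (out : Int) : Prop := out = get_refl_row_alt terrain
instance (terrain : List String) (out : Int) : Decidable (Spec_get_refl_row terrain out) := by unfold Spec_get_refl_row; infer_instance

-- ===== CLAIM (what is proved, stated in full; the proofs are below) =====
def Claim_equal_get_refl_row : Prop := ∀ (terrain : List String), Dom_get_refl_row terrain → Spec_get_refl_row terrain (get_refl_row terrain)

-- ===== LEMMAS AND PROOFS =====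

-- the common pointwise mirror condition at boundary x (x : Nat), width w
abbrev pvMirror (terrain : List String) (x w : Nat) : Prop :=
  ∀ i < w, terrain[x - i]? = terrain[x + 1 + i]?

-- A's inner loop, started i steps in, computes the pointwise condition on the remaining pairs
theorem pvAInner_spec (terrain : List String) (x : Nat) (hx : x < terrain.length)
    (w : Nat) (hw : w = min (x + 1) (terrain.length - 1 - x)) :
    ∀ d i, i + d = w →
      pvAInner terrain ((x : Int) - i) ((x : Int) + 1 + i) (decide (0 < i)) =
        decide (0 < w ∧ ∀ j, i ≤ j → j < w → terrain[x - j]? = terrain[x + 1 + j]?) := by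
  intro d
  induction d with
  | zero =>
    intro i hi
    rw [pvAInner, dif_neg (by omega)]
    have hforall : ∀ j, i ≤ j → j < w → terrain[x - j]? = terrain[x + 1 + j]? := by
      intro j h1 h2; exact absurd h2 (by omega)
    simp only [decide_eq_decide]
    constructor
    · intro h; exact ⟨by omega, hforall⟩
    · intro h; omega
  | succ d ih =>
    intro i hi
    rw [pvAInner, dif_pos (by omega)]
    have e1 : (x : Int) - i = ((x - i : Nat) : Int) := by omega
    have e2 : (x : Int) + 1 + i = (((x + 1 + i) : Nat) : Int) := by push_cast; ring
    rw [e1, e2, PySem.List.pyGet?_natCast, PySem.List.pyGet?_natCast]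
    by_cases hc : terrain[x - i]? = terrain[x + 1 + i]?
    · rw [if_neg (by simp [hc])]
      have e3 : ((x - i : Nat) : Int) - 1 = (x : Int) - ((i + 1 : Nat) : Int) := by omega
      have e4 : ((x + 1 + i : Nat) : Int) + 1 = (x : Int) + 1 + ((i + 1 : Nat) : Int) := by
        push_cast; ring
      rw [e3, e4, show (true : Bool) = decide (0 < i + 1) by simp, ih (i + 1) (by omega)]
      simp only [decide_eq_decide]
      constructor
      · rintro ⟨h0, hall⟩
        refine ⟨h0, fun j h1 h2 => ?_⟩
        rcases Nat.eq_or_lt_of_le h1 with rfl | hlt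
        · exact hc
        · exact hall j (by omega) h2
      · rintro ⟨h0, hall⟩
        exact ⟨h0, fun j h1 h2 => hall j (by omega) h2⟩
    · rw [if_pos (by simp [hc])]
      symm
      rw [decide_eq_false_iff_not]
      rintro ⟨h0, hall⟩
      exact hc (hall i (le_refl i) (by omega))

-- A's inner loop from the top computes the mirror condition
theorem pvAInner_top (terrain : List String) (x : Nat) (hx : x < terrain.length) :
    pvAInner terrain (x : Int) ((x : Int) + 1) false =
      decide (0 < min (x + 1) (terrain.length - 1 - x) ∧
        pvMirror terrain x (min (x + 1) (terrain.length - 1 - x))) := by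
  have h := pvAInner_spec terrain x hx _ rfl (min (x + 1) (terrain.length - 1 - x)) 0 (by omega)
  simp only [Nat.cast_zero, sub_zero, add_zero] at h
  rw [show (decide ((0 : Nat) < 0)) = false from rfl] at h
  rw [h]
  simp only [decide_eq_decide]
  unfold pvMirror
  constructor
  · rintro ⟨h0, hall⟩; exact ⟨h0, fun j hj => hall j (Nat.zero_le j) hj⟩
  · rintro ⟨h0, hall⟩; exact ⟨h0, fun j _ hj => hall j hj⟩

-- B's slice comparison computes the mirror condition (for x below the last row)
theorem pvBCheck_spec (terrain : List String) (x : Nat) (hx : x + 1 < terrain.length) :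
    pvBCheck terrain (x : Int) =
      decide (pvMirror terrain x (min (x + 1) (terrain.length - 1 - x))) := by
  have e1 : (x : Int) + 1 = ((x + 1 : Nat) : Int) := by push_cast; ring
  rw [pvBCheck]
  simp only [e1, PySem.List.slice_to_natCast, PySem.List.slice_from_natCast]
  set A := (terrain.take (x + 1)).reverse with hA
  set B := terrain.drop (x + 1) with hB
  have lenA : A.length = x + 1 := by
    simp [hA]; omega
  have lenB : B.length = terrain.length - (x + 1) := by simp [hB]
  set W : Nat := min (x + 1) (terrain.length - 1 - x) with hW
  have hWA : W ≤ A.length := by omega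
  have hWB : W ≤ B.length := by omega
  have ew : min ((A.length : Int)) ((B.length : Int)) = (W : Int) := by
    rw [lenA, lenB]; omega
  rw [ew, PySem.List.slice_to_natCast, PySem.List.slice_to_natCast]
  have hgA : ∀ i, i < W → A[i]? = terrain[x - i]? := by
    intro i hi
    rw [hA, List.getElem?_reverse (by simp; omega)]
    have : (terrain.take (x + 1)).length - 1 - i = x - i := by simp; omega
    rw [this]
    simp [show x - i < x + 1 by omega]
  have hgB : ∀ i, i < W → B[i]? = terrain[x + 1 + i]? := by
    intro i hi
    rw [hB, List.getElem?_drop]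
  rw [Bool.eq_iff_iff]
  simp only [beq_iff_eq, decide_eq_true_eq]
  unfold pvMirror
  constructor
  · intro h i hi
    have := congrArg (fun l => l[i]?) h
    simp only [List.getElem?_take, hi, if_pos] at this
    rwa [hgA i hi, hgB i hi] at this
  · intro h
    apply List.ext_getElem?
    intro i
    by_cases hi : i < W
    · simp only [List.getElem?_take, hi, if_pos]
      rw [hgA i hi, hgB i hi]
      exact h i hi
    · have l1 : (A.take W).length ≤ i := by simp; omega
      have l2 : (B.take W).length ≤ i := by simp; omega
      rw [List.getElem?_eq_none l1, List.getElem?_eq_none l2]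

-- the two outer loops agree from any start index x ≤ n
theorem pvOuter_eq (terrain : List String) :
    ∀ k (x : Nat), x + k = terrain.length →
      pvAOuter terrain (x : Int) =
        pvBLoop terrain (PySem.List.pyRange (x : Int) ((terrain.length : Int) - 1) 1) := by
  intro k
  induction k with
  | zero =>
    intro x hx
    rw [pvAOuter, dif_neg (by omega)]
    rw [PySem.List.pyRange_one,
        show ((terrain.length : Int) - 1 - (x : Int)).toNat = 0 by omega]
    simp [pvBLoop]
  | succ k ih =>
    intro x hx
    rw [pvAOuter, dif_pos (by omega)]
    rw [pvAInner_top terrain x (by omega)]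
    by_cases hend : x + 1 < terrain.length
    · rw [PySem.List.pyRange_one_cons (by omega)]
      rw [pvBLoop, pvBCheck_spec terrain x hend]
      have h0 : 0 < min (x + 1) (terrain.length - 1 - x) := by omega
      rw [show decide (0 < min (x + 1) (terrain.length - 1 - x) ∧
            pvMirror terrain x (min (x + 1) (terrain.length - 1 - x))) =
          decide (pvMirror terrain x (min (x + 1) (terrain.length - 1 - x))) from
        decide_eq_decide.mpr (by constructor <;> intro h <;> [exact h.2; exact ⟨h0, h⟩])]
      by_cases hm : pvMirror terrain x (min (x + 1) (terrain.length - 1 - x))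
      · rw [if_pos (decide_eq_true hm), if_pos (decide_eq_true hm)]
      · simp only [hm, decide_false, Bool.false_eq_true, if_false]
        rw [show (x : Int) + 1 = ((x + 1 : Nat) : Int) by push_cast; ring]
        exact ih (x + 1) (by omega)
    · rw [show min (x + 1) (terrain.length - 1 - x) = 0 by omega]
      simp only [Nat.lt_irrefl, false_and, decide_false, Bool.false_eq_true, if_false]
      have h1 := ih (x + 1) (by omega)
      rw [PySem.List.pyRange_one,
          show ((terrain.length : Int) - 1 - ((x + 1 : Nat) : Int)).toNat = 0 by omega] at h1
      rw [PySem.List.pyRange_one,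
          show ((terrain.length : Int) - 1 - (x : Int)).toNat = 0 by omega]
      simp only [List.range_zero, List.map_nil, pvBLoop] at h1 ⊢
      rw [show (x : Int) + 1 = ((x + 1 : Nat) : Int) by push_cast; ring]
      exact h1

-- ===== VERDICT (by name: the statement is the Claim_ definition above) =====
theorem get_refl_row_spec : Claim_equal_get_refl_row := by
  intro terrain _
  unfold Spec_get_refl_row get_refl_row get_refl_row_alt
  have h := pvOuter_eq terrain terrain.length 0 (by omega)
  simpa using h
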